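-- pv_equiv track=rewrite | github.com/miliar/Code_Jam_Webscraper | solutions_python/Problem_201/2683.py | fill_stalls
-- ===== SOURCE A (Python) =====
-- import math
--
-- def fill_stalls(N, K):
--     gaps = {0 : N}
--     for _ in range(K):
--         maxGapIndex = max(gaps, key=gaps.get)
--         maxGapValue = gaps[maxGapIndex]
--         R = math.floor(maxGapValue / 2)
--         L = maxGapValue - R - 1
--         gaps[maxGapIndex] = L
--         gaps[maxGapIndex + L + 1] = R
--     gaps = {k:v for k, v in gaps.items() if v != 0}
--     return L, R
-- ===== SOURCE B (Python) =====
-- def fill_stalls(N, K):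
--     # Batch simulation: count gaps by length, split all copies of the largest
--     # length at once; O(log N) rounds instead of K single splits.
--     cnt = {N: 1}
--     k = K
--     while True:
--         s = max(cnt)
--         c = cnt.pop(s)
--         R = s // 2
--         L = s - R - 1
--         if k <= c or s == 0:
--             return L, R
--         k -= c
--         cnt[L] = cnt.get(L, 0) + c
--         cnt[R] = cnt.get(R, 0) + c
-- ===== Notes on version B (the rewrite author's own statement) =====
-- stated objective: faster
-- what changed: A rescans the whole gaps dict K times to split one largest gap per iteration; B keeps a counter of gap lengths and splits every copy of the current largest length in one batch, so the number of rounds is about log2(N) instead of K.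
-- outside the precondition, e.g. on fill_stalls(-7, 3): A returns (-2, -1), B returns (-3, -2); on fill_stalls(5, 0): A raises UnboundLocalError, B returns (2, 2)
import Mathlib
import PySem

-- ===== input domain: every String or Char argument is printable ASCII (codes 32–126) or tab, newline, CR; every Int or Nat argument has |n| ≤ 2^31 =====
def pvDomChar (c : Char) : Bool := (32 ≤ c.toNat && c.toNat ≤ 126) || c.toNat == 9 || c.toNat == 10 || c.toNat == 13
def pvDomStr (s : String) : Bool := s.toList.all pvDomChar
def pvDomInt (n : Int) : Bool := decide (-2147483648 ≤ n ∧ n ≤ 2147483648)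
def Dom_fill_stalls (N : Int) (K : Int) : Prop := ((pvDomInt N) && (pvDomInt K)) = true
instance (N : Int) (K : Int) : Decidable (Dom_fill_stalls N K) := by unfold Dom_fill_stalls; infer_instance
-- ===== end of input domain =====

-- B replaces A's K single splits of the largest gap (argmax scan over the whole dict each
-- round) by a counter of gap lengths that splits all copies of the largest length at once.

-- ===== PORT A =====
-- one iteration of A's loop body; state = (gaps, last (L, R))
def aStep (st : PySem.Dict Int Int × Option (Int × Int)) : PySem.Dict Int Int × Option (Int × Int) :=
  match PySem.List.max? st.1.keys (fun k => st.1.getD k 0) with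
  | none => st   -- max() on an empty dict raises; unreachable, gaps is never empty
  | some maxGapIndex =>
    let maxGapValue := st.1.getD maxGapIndex 0
    -- math.floor(maxGapValue / 2) = floor division (exact on |n| ≤ 2^31 < 2^53)
    let R := PySem.Int.floordiv maxGapValue 2
    let L := maxGapValue - R - 1
    (((st.1.insert maxGapIndex L).insert (maxGapIndex + L + 1) R), some (L, R))

def fill_stalls (N : Int) (K : Int) : List Int :=
  let st := (List.range K.toNat).foldl (fun st _ => aStep st) ((PySem.Dict.empty.insert 0 N), none)
  -- gaps = {k:v for k,v in gaps.items() if v != 0}  (rebinds gaps; the return reads only L, R)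
  let _gaps : PySem.Dict Int Int := PySem.Dict.mk (st.1.items.filter (fun p => p.2 != 0))
  match st.2 with
  | some (L, R) => [L, R]
  | none => []   -- K ≤ 0: Python raises UnboundLocalError here; excluded by Pre_

-- ===== PORT B =====
-- fuel = K.toNat + 1 rounds are always enough: k drops by c ≥ 1 every round
def bLoop : Nat → PySem.Dict Int Int → Int → List Int
  | 0, _, _ => []          -- fuel exhausted: unreachable
  | fuel+1, cnt, k =>
    match PySem.List.max? cnt.keys (fun x => x) with
    | none => []           -- max() on an empty dict: unreachable, cnt is never empty
    | some s =>
      match cnt.pop? s with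
      | none => []         -- unreachable: s is a key of cnt
      | some (c, cnt') =>
        let R := PySem.Int.floordiv s 2
        let L := s - R - 1
        if k ≤ c ∨ s = 0 then [L, R]
        else
          let cnt1 := cnt'.insert L (cnt'.getD L 0 + c)
          let cnt2 := cnt1.insert R (cnt1.getD R 0 + c)
          bLoop fuel cnt2 (k - c)

def fill_stalls_alt (N : Int) (K : Int) : List Int :=
  bLoop (K.toNat + 1) (PySem.Dict.empty.insert N 1) K

-- ===== PRECONDITION & SPEC =====
-- Pre_ excludes K ≤ 0, where A raises UnboundLocalError, and negative N (a negative number of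
-- stalls, outside the task's natural domain), where A's value depends on accidental dict-key
-- collisions of its position bookkeeping.
def Pre_fill_stalls (N : Int) (K : Int) : Prop := 1 ≤ K ∧ 0 ≤ N
instance (N : Int) (K : Int) : Decidable (Pre_fill_stalls N K) := by unfold Pre_fill_stalls; infer_instance
def pvWitness_fill_stalls : Int × Int := (10, 4)
def Spec_fill_stalls (N : Int) (K : Int) (out : List Int) : Prop := out = fill_stalls_alt N K
instance (N : Int) (K : Int) (out : List Int) : Decidable (Spec_fill_stalls N K out) := by unfold Spec_fill_stalls; infer_instance

-- ===== CLAIM (what is proved, stated in full; the proofs are below) =====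
def Claim_equal_fill_stalls : Prop := ∀ (N : Int) (K : Int), Dom_fill_stalls N K → Pre_fill_stalls N K → Spec_fill_stalls N K (fill_stalls N K)

-- ===== LEMMAS AND PROOFS =====

-- Abstract model both ports are reduced to: the multiset (as a list up to permutation) of gap
-- lengths; one abstract step splits one occurrence of the largest length (splitting a zero
-- gap leaves the multiset unchanged, exactly as A's colliding dict keys do).
def pvChildR (v : Int) : Int := PySem.Int.floordiv v 2
def pvChildL (v : Int) : Int := v - pvChildR v - 1
def pvMx (M : List Int) : Int := M.foldl max 0
def pvT (M : List Int) : List Int :=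
  if pvMx M = 0 then M else pvChildL (pvMx M) :: pvChildR (pvMx M) :: M.erase (pvMx M)
def pvPair (M : List Int) : List Int := [pvChildL (pvMx M), pvChildR (pvMx M)]

-- invariant of A's gaps dict: unique keys, nonempty, nonnegative lengths, and no key lying
-- strictly inside another entry's interval (key, key + length]
def InvA (g : PySem.Dict Int Int) : Prop :=
  g.keys.Nodup ∧ g.items ≠ [] ∧ (∀ p ∈ g.items, 0 ≤ p.2) ∧
  ∀ p ∈ g.items, ∀ q ∈ g.items, p.1 ≠ q.1 → ¬(p.1 < q.1 ∧ q.1 ≤ p.1 + p.2)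

-- B's cnt is a counter of the multiset M
def RepB (cnt : PySem.Dict Int Int) (M : List Int) : Prop :=
  cnt.keys.Nodup ∧ (∀ v : Int, cnt.getD v 0 = (M.count v : Int)) ∧
  (∀ x ∈ M, 0 ≤ x) ∧ (∀ k ∈ cnt.keys, k ∈ M) ∧ M ≠ []

lemma pv_mx_eq {M : List Int} {s : Int} (hmem : s ∈ M) (hub : ∀ x ∈ M, x ≤ s) (h0 : 0 ≤ s) :
    pvMx M = s := by
  have h1 := PySem.List.le_foldl_max M (0 : Int)
  have h2 := PySem.List.foldl_max_mem M (0 : Int)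
  unfold pvMx
  rcases h2 with h2 | h2
  · have := h1.2 s hmem; omega
  · have := hub _ h2; have := h1.2 s hmem; omega

lemma pv_child_bounds {v : Int} (h : 1 ≤ v) :
    0 ≤ pvChildL v ∧ pvChildL v ≤ pvChildR v ∧ pvChildR v < v := by
  unfold pvChildL pvChildR
  rw [PySem.Int.floordiv_eq_ediv_of_pos (by norm_num)]
  omega

lemma pv_iter_fixed {M : List Int} (h : pvMx M = 0) : ∀ j : Nat, pvT^[j] M = M := by
  intro j
  have : pvT M = M := by unfold pvT; rw [if_pos h]
  exact Function.iterate_fixed this j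

lemma pv_find?_filter_ne (t : List (Int × Int)) (k w : Int) (hwk : w ≠ k) :
    List.find? (fun p => p.1 == w) (t.filter (fun p => !p.1 == k))
      = List.find? (fun p => p.1 == w) t := by
  induction t with
  | nil => rfl
  | cons p t ih =>
    by_cases hpk : p.1 = k
    · have hkw : (k == w) = false := by simp; omega
      simp [List.filter_cons, hpk, ih, List.find?_cons, hkw]
    · by_cases hpw : p.1 = w
      · rw [List.filter_cons, if_pos (by simpa using hpk)]
        simp [List.find?_cons, hpw]
      · simp [List.filter_cons, hpk, List.find?_cons, hpw, ih]

lemma pv_get?_erase (d : PySem.Dict Int Int) (k w : Int) :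
    (d.erase k).get? w = if w = k then none else d.get? w := by
  simp only [PySem.Dict.erase, PySem.Dict.get?]
  by_cases hwk : w = k
  · subst hwk
    rw [if_pos rfl, List.find?_eq_none.2, Option.map_none]
    intro p hp
    simp only [List.mem_filter] at hp
    simpa using hp.2
  · rw [if_neg hwk, pv_find?_filter_ne _ _ _ hwk]

lemma pv_mem_keys_erase (d : PySem.Dict Int Int) (k w : Int) :
    w ∈ (d.erase k).keys ↔ w ∈ d.keys ∧ w ≠ k := by
  simp only [PySem.Dict.erase, PySem.Dict.keys, List.mem_map, List.mem_filter]
  constructor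
  · rintro ⟨p, ⟨hp, hpk⟩, rfl⟩
    exact ⟨⟨p, hp, rfl⟩, by simpa using hpk⟩
  · rintro ⟨⟨p, hp, rfl⟩, hwk⟩
    exact ⟨p, ⟨hp, by simpa using hwk⟩, rfl⟩

lemma pv_nodup_keys_erase (d : PySem.Dict Int Int) (k : Int) (h : d.keys.Nodup) :
    (d.erase k).keys.Nodup := by
  simp only [PySem.Dict.erase, PySem.Dict.keys] at *
  exact h.sublist (List.Sublist.map _ List.filter_sublist)

lemma pv_insert_getD_self (d : PySem.Dict Int Int) (i : Int) (hnd : d.keys.Nodup)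
    (hc : d.contains i = true) : d.insert i (d.getD i 0) = d := by
  apply PySem.Dict.ext
  rw [PySem.Dict.items_insert_of_contains _ _ hc]
  have : ∀ p ∈ d.items, (if (p.1 == i) = true then ((i, d.getD i 0) : Int × Int) else p) = p := by
    intro p hp
    by_cases hpi : p.1 = i
    · obtain ⟨a, b⟩ := p
      simp only at hpi
      subst hpi
      have : d.getD a 0 = b := PySem.Dict.getD_of_mem_items d hp hnd 0
      simp [this]
    · simp [hpi]
  rw [List.map_congr_left this]
  simp

lemma pv_map_snd_replace_perm (l : List (Int × Int)) (i v L' : Int)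
    (hnd : (l.map Prod.fst).Nodup) (hm : (i, v) ∈ l) :
    ((l.map (fun p => if p.1 == i then (i, L') else p)).map Prod.snd).Perm
      (L' :: (l.map Prod.snd).erase v) := by
  induction l with
  | nil => simp at hm
  | cons p t ih =>
    simp only [List.map_cons, List.nodup_cons] at hnd
    rcases List.mem_cons.1 hm with hp | ht
    · cases hp.symm
      have hrepl : t.map (fun p => if p.1 == i then ((i : Int), L') else p) = t := by
        rw [List.map_congr_left (g := id) ?_, List.map_id]
        intro q hq
        have hqi : q.1 ≠ i := fun h => hnd.1 (List.mem_map.2 ⟨q, hq, h⟩)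
        simp [hqi]
      have hhead : (((i, v) : Int × Int) :: t).map (fun p => if p.1 == i then ((i : Int), L') else p)
          = (i, L') :: t := by
        rw [List.map_cons, if_pos (show ((((i, v) : Int × Int).1 == i) = true) by simp), hrepl]
      rw [hhead]
      simp only [List.map_cons, List.erase_cons_head]
      exact List.Perm.refl _
    · have hpi : p.1 ≠ i := by
        intro h
        exact hnd.1 (by rw [h]; exact List.mem_map_of_mem (f := Prod.fst) ht)
      have ih' := ih hnd.2 ht
      have hv : v ∈ t.map Prod.snd := List.mem_map_of_mem (f := Prod.snd) ht
      simp only [List.map_cons]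
      rw [if_neg (show ¬ ((p.1 == i) = true) from by simp [hpi])]
      by_cases hpv : p.2 = v
      · subst hpv
        rw [List.erase_cons_head]
        refine ((ih'.cons p.2).trans (List.Perm.swap _ _ _)).trans ?_
        exact ((List.perm_cons_erase hv).symm).cons L'
      · rw [List.erase_cons_tail (by simp [hpv])]
        exact (ih'.cons p.2).trans (List.Perm.swap _ _ _)

lemma pv_batch (s : Int) (hs : 1 ≤ s) (M : List Int) :
    ∀ j : Nat, j ≤ M.count s → (∀ x ∈ M, 0 ≤ x ∧ x ≤ s) →
    (∀ x ∈ pvT^[j] M, 0 ≤ x ∧ x ≤ s) ∧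
    (∀ w : Int, (pvT^[j] M).count w
      = M.count w - (if w = s then j else 0) + (if w = pvChildL s then j else 0)
          + (if w = pvChildR s then j else 0)) := by
  intro j
  induction j with
  | zero => intro _ hb; simpa using hb
  | succ j ih =>
    intro hj hb
    have ihj := ih (by omega) hb
    set X := pvT^[j] M with hX
    have hcount : X.count s = M.count s - j := by
      have := ihj.2 s
      rw [if_pos rfl, if_neg (show ¬ s = pvChildL s by have := pv_child_bounds hs; omega),
        if_neg (show ¬ s = pvChildR s by have := pv_child_bounds hs; omega)] at this
      omega
    have hsX : s ∈ X := by
      rw [← List.count_pos_iff]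
      omega
    have hmx : pvMx X = s := pv_mx_eq hsX (fun x hx => (ihj.1 x hx).2) (by omega)
    have hstep : pvT^[j+1] M = pvChildL s :: pvChildR s :: X.erase s := by
      rw [Function.iterate_succ_apply', ← hX]
      unfold pvT
      rw [hmx, if_neg (by omega)]
    rw [hstep]
    constructor
    · intro x hx
      rcases List.mem_cons.1 hx with rfl | hx
      · have := pv_child_bounds hs; omega
      rcases List.mem_cons.1 hx with rfl | hx
      · have := pv_child_bounds hs; omega
      · exact ihj.1 x (List.mem_of_mem_erase hx)
    · intro w
      have hec : (X.erase s).count w = X.count w - (if w = s then 1 else 0) := by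
        by_cases hws : w = s
        · subst hws; simp [List.count_erase_self]
        · simp [hws, List.count_erase_of_ne hws]
      have hw := ihj.2 w
      simp only [List.count_cons, beq_iff_eq]
      rw [hec, hw]
      have hb := pv_child_bounds hs
      split_ifs <;> omega

lemma pv_aStep_eq (g : PySem.Dict Int Int) (lr : Option (Int × Int)) {i : Int}
    (hmax : PySem.List.max? g.keys (fun k => g.getD k 0) = some i) :
    aStep (g, lr) = (((g.insert i (pvChildL (g.getD i 0))).insert
        (i + pvChildL (g.getD i 0) + 1) (pvChildR (g.getD i 0))),
      some (pvChildL (g.getD i 0), pvChildR (g.getD i 0))) := by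
  unfold aStep
  rw [hmax]
  rfl

lemma pv_aStep_spec (g : PySem.Dict Int Int) (lr : Option (Int × Int)) (M : List Int)
    (hInv : InvA g) (hperm : g.values.Perm M) :
    InvA (aStep (g, lr)).1 ∧ ((aStep (g, lr)).1).values.Perm (pvT M) ∧
      (aStep (g, lr)).2 = some (pvChildL (pvMx M), pvChildR (pvMx M)) := by
  obtain ⟨hnd, hne, hnn, hgeo⟩ := hInv
  -- the dict is nonempty, so max() returns some key i
  have hkeysne : g.keys ≠ [] := by
    simp only [PySem.Dict.keys]
    exact fun h => hne (List.map_eq_nil_iff.1 h)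
  obtain ⟨i, hmax⟩ : ∃ i, PySem.List.max? g.keys (fun k => g.getD k 0) = some i := by
    cases h : PySem.List.max? g.keys (fun k => g.getD k 0) with
    | none => exact absurd ((PySem.List.max?_eq_none_iff _ _).1 h) hkeysne
    | some i => exact ⟨i, rfl⟩
  set s := g.getD i 0 with hs_def
  have hikeys : i ∈ g.keys := PySem.List.max?_mem hmax
  have hub : ∀ k' ∈ g.keys, g.getD k' 0 ≤ s := PySem.List.max?_isMax hmax
  -- (i, s) ∈ items
  obtain ⟨pi, hpi_mem, hpi_fst⟩ : ∃ p ∈ g.items, p.1 = i := List.mem_map.1 hikeys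
  have hpi_snd : pi.2 = s := by
    have h := PySem.Dict.getD_of_mem_items g (k := pi.1) (v := pi.2) hpi_mem hnd 0
    rw [hpi_fst] at h
    exact h.symm
  have his_mem : ((i, s) : Int × Int) ∈ g.items := by
    have : pi = (i, s) := Prod.ext hpi_fst hpi_snd
    rwa [this] at hpi_mem
  have hcont : g.contains i = true := (PySem.Dict.contains_iff_mem_keys g i).2 hikeys
  -- s bounds all values and is a value
  have hvals_eq := PySem.Dict.values_eq_map_keys g hnd 0
  have hub_vals : ∀ w ∈ g.values, w ≤ s := by
    intro w hw
    rw [hvals_eq] at hw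
    obtain ⟨k', hk', rfl⟩ := List.mem_map.1 hw
    exact hub k' hk'
  have hs_val : s ∈ g.values := by
    rw [hvals_eq]
    exact List.mem_map.2 ⟨i, hikeys, rfl⟩
  have hs0 : 0 ≤ s := by
    have : s ∈ g.items.map Prod.snd := hs_val
    obtain ⟨p, hp, hps⟩ := List.mem_map.1 this
    rw [← hps]; exact hnn p hp
  have hmx : pvMx M = s :=
    pv_mx_eq (hperm.mem_iff.1 hs_val) (fun x hx => hub_vals x (hperm.mem_iff.2 hx)) hs0
  rw [pv_aStep_eq g lr hmax, ← hs_def, hmx]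
  by_cases hs : s = 0
  · -- splitting a zero gap rewrites the same key twice: the dict is unchanged
    have hL : pvChildL s = -1 := by rw [hs]; decide
    have hR : pvChildR s = 0 := by rw [hs]; decide
    have hkey : i + pvChildL s + 1 = i := by rw [hL]; ring
    have hdict : ((g.insert i (pvChildL s)).insert (i + pvChildL s + 1) (pvChildR s)) = g := by
      rw [hkey, PySem.Dict.insert_insert_self, hR, ← hs, hs_def]
      exact pv_insert_getD_self g i hnd hcont
    rw [hdict]
    have hTM : pvT M = M := by unfold pvT; rw [hmx, if_pos hs]
    exact ⟨⟨hnd, hne, hnn, hgeo⟩, by rw [hTM]; exact hperm, rfl⟩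
  · have hs1 : 1 ≤ s := by omega
    obtain ⟨hL0, hLR, hRs⟩ := pv_child_bounds hs1
    set L := pvChildL s with hLdef
    set R := pvChildR s with hRdef
    have hsum : s = L + R + 1 := by rw [hLdef, hRdef]; unfold pvChildL; ring
    set j := i + L + 1 with hjdef
    have hji : j ≠ i := by omega
    -- the new key j is fresh
    have hfresh : g.contains j = false := by
      cases hc : g.contains j with
      | false => rfl
      | true =>
        exfalso
        obtain ⟨q, hq_mem, hq_fst⟩ := List.mem_map.1 ((PySem.Dict.contains_iff_mem_keys g j).1 hc)
        have hqi : ((i, s) : Int × Int).1 ≠ q.1 := by simp [hq_fst]; omega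
        exact hgeo (i, s) his_mem q hq_mem hqi (by simp [hq_fst]; omega)
    have hg1cont : (g.insert i L).contains j = false := by
      rw [PySem.Dict.contains_insert]
      simp [hfresh, hji]
    have hitems1 := PySem.Dict.items_insert_of_contains g L hcont
    have hitems2 := PySem.Dict.items_insert_of_not_contains (g.insert i L) R hg1cont
    refine ⟨?_, ?_, ?_⟩
    · -- InvA of the new dict
      refine ⟨PySem.Dict.nodup_keys_insert _ _ _ (PySem.Dict.nodup_keys_insert _ _ _ hnd), ?_, ?_, ?_⟩
      · simp only [hitems2]
        simp
      · intro p hp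
        rcases (PySem.Dict.mem_items_insert _ _ _ _).1 hp with rfl | ⟨hp1, _⟩
        · exact le_trans hL0 hLR
        rcases (PySem.Dict.mem_items_insert _ _ _ _).1 hp1 with rfl | ⟨hpold, _⟩
        · exact hL0
        · exact hnn p hpold
      · intro p hp q hq hne'
        have hfacts : ∀ r : Int × Int, r ∈ g.items → r.1 ≠ i →
            ¬(i < r.1 ∧ r.1 ≤ i + s) ∧ ¬(r.1 < i ∧ i ≤ r.1 + r.2) ∧ 0 ≤ r.2 := by
          intro r hr hri
          exact ⟨hgeo (i, s) his_mem r hr (fun h => hri h.symm),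
            hgeo r hr (i, s) his_mem hri, hnn r hr⟩
        rcases (PySem.Dict.mem_items_insert _ _ _ _).1 hp with rfl | ⟨hp1, hpj⟩ <;>
          [skip; rcases (PySem.Dict.mem_items_insert _ _ _ _).1 hp1 with rfl | ⟨hpold, hpi'⟩] <;>
          rcases (PySem.Dict.mem_items_insert _ _ _ _).1 hq with rfl | ⟨hq1, hqj⟩ <;>
          [skip; rcases (PySem.Dict.mem_items_insert _ _ _ _).1 hq1 with rfl | ⟨hqold, hqi'⟩;
           skip; rcases (PySem.Dict.mem_items_insert _ _ _ _).1 hq1 with rfl | ⟨hqold, hqi'⟩;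
           skip; rcases (PySem.Dict.mem_items_insert _ _ _ _).1 hq1 with rfl | ⟨hqold, hqi'⟩]
        · simp at hne'
        · simp only at hne' ⊢; omega
        · obtain ⟨f1, f2, f3⟩ := hfacts q hqold hqi'
          simp only at hne' ⊢; omega
        · simp only at hne' ⊢; omega
        · simp at hne'
        · obtain ⟨f1, f2, f3⟩ := hfacts q hqold hqi'
          simp only at hne' ⊢; omega
        · obtain ⟨f1, f2, f3⟩ := hfacts p hpold hpi'
          simp only at hne' ⊢; omega
        · obtain ⟨f1, f2, f3⟩ := hfacts p hpold hpi'
          simp only at hne' ⊢; omega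
        · exact hgeo p hpold q hqold hne'
    · -- values permutation
      have hvals2 : ((g.insert i L).insert j R).values
          = ((g.items.map (fun p => if p.1 == i then (i, L) else p)).map Prod.snd) ++ [R] := by
        simp only [PySem.Dict.values, hitems2, hitems1, List.map_append, List.map_cons, List.map_nil]
      rw [hvals2]
      have hperm1 := pv_map_snd_replace_perm g.items i s L hnd his_mem
      have hTM : pvT M = L :: R :: M.erase s := by
        unfold pvT
        rw [hmx, if_neg hs, ← hLdef, ← hRdef]
      rw [hTM]
      exact ((hperm1.append_right [R]).trans
        ((List.perm_append_singleton R ((g.items.map Prod.snd).erase s)).cons L)).trans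
        (((hperm.erase s).cons R).cons L)
    · rfl

lemma pv_getD_erase (d : PySem.Dict Int Int) (k w : Int) :
    (d.erase k).getD w 0 = if w = k then 0 else d.getD w 0 := by
  simp only [PySem.Dict.getD, pv_get?_erase]
  split_ifs <;> rfl

lemma pv_foldl_const_iterate {α β : Type} (f : α → α) (l : List β) (a : α) :
    l.foldl (fun s _ => f s) a = f^[l.length] a := by
  induction l generalizing a with
  | nil => rfl
  | cons x t ih => simp [List.foldl_cons, ih, Function.iterate_succ_apply]

lemma pv_aIter (N : Int) (hN : 0 ≤ N) (n : Nat) :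
    InvA ((aStep^[n] ((PySem.Dict.empty.insert 0 N : PySem.Dict Int Int), (none : Option (Int × Int)))).1) ∧
    ((aStep^[n] ((PySem.Dict.empty.insert 0 N : PySem.Dict Int Int), (none : Option (Int × Int)))).1).values.Perm (pvT^[n] [N]) ∧
    (n ≠ 0 → (aStep^[n] ((PySem.Dict.empty.insert 0 N : PySem.Dict Int Int), (none : Option (Int × Int)))).2
        = some (pvChildL (pvMx (pvT^[n-1] [N])), pvChildR (pvMx (pvT^[n-1] [N])))) := by
  induction n with
  | zero =>
    refine ⟨⟨?_, ?_, ?_, ?_⟩, ?_, ?_⟩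
    · show ([(0, N)].map Prod.fst).Nodup
      simp
    · show ([((0 : Int), N)] : List (Int × Int)) ≠ []
      simp
    · show ∀ p ∈ ([((0 : Int), N)] : List (Int × Int)), 0 ≤ p.2
      intro p hp
      simp only [List.mem_singleton] at hp
      simp [hp, hN]
    · show ∀ p ∈ ([((0 : Int), N)] : List (Int × Int)), ∀ q ∈ ([((0 : Int), N)] : List (Int × Int)), _
      intro p hp q hq hne
      simp only [List.mem_singleton] at hp hq
      rw [hp, hq] at hne
      simp at hne
    · show ([N] : List Int).Perm [N]
      exact List.Perm.refl _
    · simp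
  | succ n ih =>
    have hstep := pv_aStep_spec _ (aStep^[n] ((PySem.Dict.empty.insert 0 N : PySem.Dict Int Int), (none : Option (Int × Int)))).2 (pvT^[n] [N]) ih.1 ih.2.1
    rw [Function.iterate_succ_apply', Function.iterate_succ_apply']
    refine ⟨hstep.1, hstep.2.1, fun _ => ?_⟩
    simpa using hstep.2.2

lemma pv_A_char (N K : Int) (hN : 0 ≤ N) (hK : 1 ≤ K) :
    fill_stalls N K = pvPair (pvT^[K.toNat - 1] [N]) := by
  have h := (pv_aIter N hN K.toNat).2.2 (by omega)
  simp only [fill_stalls, pv_foldl_const_iterate, List.length_range]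
  rw [h]
  rfl

lemma pv_bLoop_eq (fuel : Nat) (cnt : PySem.Dict Int Int) (k : Int) {s c : Int}
    {cnt' : PySem.Dict Int Int}
    (hmax : PySem.List.max? cnt.keys (fun x => x) = some s)
    (hpop : cnt.pop? s = some (c, cnt')) :
    bLoop (fuel + 1) cnt k =
      if k ≤ c ∨ s = 0 then [pvChildL s, pvChildR s]
      else bLoop fuel (((cnt'.insert (pvChildL s) (cnt'.getD (pvChildL s) 0 + c))).insert
          (pvChildR s) ((cnt'.insert (pvChildL s) (cnt'.getD (pvChildL s) 0 + c)).getD (pvChildR s) 0 + c))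
        (k - c) := by
  conv_lhs => rw [bLoop]
  rw [hmax]
  dsimp only
  rw [hpop]
  rfl

lemma pv_bLoop_correct : ∀ (fuel : Nat) (cnt : PySem.Dict Int Int) (M : List Int) (k : Int),
    RepB cnt M → 1 ≤ k → k ≤ (fuel : Int) →
    bLoop fuel cnt k = pvPair (pvT^[(k-1).toNat] M) := by
  intro fuel
  induction fuel with
  | zero => intro cnt M k _ h1 h2; exfalso; simp at h2; omega
  | succ fuel ih =>
    intro cnt M k hRep h1 h2
    obtain ⟨hnd, hcnt, hnn, hkeysM, hMne⟩ := hRep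
    -- every element of M is a key of cnt
    have hMkeys : ∀ x ∈ M, x ∈ cnt.keys := by
      intro x hx
      by_contra hxk
      have : cnt.contains x = false := by
        cases h : cnt.contains x with
        | false => rfl
        | true => exact absurd ((PySem.Dict.contains_iff_mem_keys cnt x).1 h) hxk
      have h0 := PySem.Dict.getD_of_not_contains cnt (0 : Int) this
      rw [hcnt x] at h0
      have : 0 < M.count x := List.count_pos_iff.2 hx
      omega
    have hkeysne : cnt.keys ≠ [] := by
      obtain ⟨x, hx⟩ := List.exists_mem_of_ne_nil M hMne
      exact List.ne_nil_of_mem (hMkeys x hx)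
    obtain ⟨s, hmax⟩ : ∃ s, PySem.List.max? cnt.keys (fun x => x) = some s := by
      cases h : PySem.List.max? cnt.keys (fun x => x) with
      | none => exact absurd ((PySem.List.max?_eq_none_iff _ _).1 h) hkeysne
      | some s => exact ⟨s, rfl⟩
    have hskeys : s ∈ cnt.keys := PySem.List.max?_mem hmax
    have hsM : s ∈ M := hkeysM s hskeys
    have hub : ∀ x ∈ M, x ≤ s := fun x hx => PySem.List.max?_isMax hmax x (hMkeys x hx)
    have hs0 : 0 ≤ s := hnn s hsM
    have hbounds : ∀ x ∈ M, 0 ≤ x ∧ x ≤ s := fun x hx => ⟨hnn x hx, hub x hx⟩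
    -- pop succeeds and returns the count of s
    obtain ⟨v, hget⟩ : ∃ v, cnt.get? s = some v := by
      cases h : cnt.get? s with
      | none => exact absurd ((PySem.Dict.get?_eq_none_iff_not_mem_keys cnt s).1 h) (by simpa using hskeys)
      | some v => exact ⟨v, rfl⟩
    have hpop : cnt.pop? s = some (v, cnt.erase s) := by
      simp [PySem.Dict.pop?, hget]
    have hv : v = (M.count s : Int) := by
      have := hcnt s
      rw [PySem.Dict.getD, hget] at this
      simpa using this
    have hv1 : 1 ≤ v := by
      have : 0 < M.count s := List.count_pos_iff.2 hsM
      omega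
    rw [pv_bLoop_eq fuel cnt k hmax hpop]
    by_cases hcase : k ≤ v ∨ s = 0
    · rw [if_pos hcase]
      by_cases hs : s = 0
      · -- all gaps are zero: every further split returns (-1, 0)
        have hmx0 : pvMx M = 0 := by
          rw [← hs]
          exact pv_mx_eq hsM hub hs0
        rw [pv_iter_fixed hmx0]
        unfold pvPair
        rw [hmx0, hs]
      · have hs1 : 1 ≤ s := by omega
        have hkv : k ≤ v := by rcases hcase with h | h; exact h; exact absurd h hs
        set j : Nat := (k - 1).toNat with hj
        have hjc : j ≤ M.count s := by omega
        have hbatch := pv_batch s hs1 M j hjc hbounds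
        have hcj : (pvT^[j] M).count s = M.count s - j := by
          have h := hbatch.2 s
          rw [if_pos rfl, if_neg (show ¬ s = pvChildL s by have := pv_child_bounds hs1; omega),
            if_neg (show ¬ s = pvChildR s by have := pv_child_bounds hs1; omega)] at h
          omega
        have hsmem : s ∈ pvT^[j] M := by
          rw [← List.count_pos_iff]
          omega
        have hmxj : pvMx (pvT^[j] M) = s :=
          pv_mx_eq hsmem (fun x hx => (hbatch.1 x hx).2) hs0
        unfold pvPair
        rw [hmxj]
    · rw [if_neg hcase]
      have hvk : v < k := by by_contra h; exact hcase (Or.inl (by omega))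
      have hsne : s ≠ 0 := fun h => hcase (Or.inr h)
      have hs1 : 1 ≤ s := by omega
      have hb := pv_child_bounds hs1
      set cN : Nat := M.count s with hcN
      have hbatch := pv_batch s hs1 M cN (le_refl _) hbounds
      set M' := pvT^[cN] M with hM'
      set Lc := pvChildL s with hLc
      set Rc := pvChildR s with hRc
      have hLne : Lc ≠ s := by omega
      have hRne : Rc ≠ s := by omega
      have hcount' : ∀ w : Int, M'.count w
          = M.count w - (if w = s then cN else 0) + (if w = Lc then cN else 0)
            + (if w = Rc then cN else 0) := hbatch.2
      have hcountL : cN ≤ M'.count Lc := by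
        have := hcount' Lc
        rw [if_neg hLne, if_pos rfl] at this
        split_ifs at this <;> omega
      have hcountR : cN ≤ M'.count Rc := by
        have := hcount' Rc
        rw [if_neg hRne, if_pos rfl] at this
        split_ifs at this <;> omega
      have hcN1 : 1 ≤ cN := List.count_pos_iff.2 hsM
      set cnt1 := (cnt.erase s).insert Lc ((cnt.erase s).getD Lc 0 + v) with hcnt1
      set cnt2 := cnt1.insert Rc (cnt1.getD Rc 0 + v) with hcnt2
      have e2 : ∀ u : Int, cnt2.getD u 0 = if u = Rc then cnt1.getD Rc 0 + v else cnt1.getD u 0 := by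
        intro u
        rw [hcnt2, PySem.Dict.getD_insert]
      have e1 : ∀ u : Int, cnt1.getD u 0 = if u = Lc then (cnt.erase s).getD Lc 0 + v
          else (cnt.erase s).getD u 0 := by
        intro u
        rw [hcnt1, PySem.Dict.getD_insert]
      have e0 : ∀ u : Int, (cnt.erase s).getD u 0 = if u = s then 0 else (M.count u : Int) := by
        intro u
        rw [pv_getD_erase]
        split_ifs
        · rfl
        · exact hcnt u
      have hgetD2 : ∀ w : Int, cnt2.getD w 0 = (M'.count w : Int) := by
        intro w
        by_cases hws : w = s
        · simp only [hws]
          rw [e2 s, if_neg (fun h => hRne h.symm), e1 s, if_neg (fun h => hLne h.symm),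
            e0 s, if_pos rfl, hcount' s, if_pos rfl, if_neg (fun h => hLne h.symm),
            if_neg (fun h => hRne h.symm)]
          omega
        · by_cases hwR : w = Rc
          · simp only [hwR]
            by_cases hRL : Rc = Lc
            · have hlink : M.count Rc = M.count Lc := by rw [hRL]
              rw [e2 Rc, if_pos rfl, e1 Rc, if_pos hRL, e0 Lc, if_neg hLne,
                hcount' Rc, if_neg hRne, if_pos hRL, if_pos rfl]
              omega
            · rw [e2 Rc, if_pos rfl, e1 Rc, if_neg hRL, e0 Rc, if_neg hRne,
                hcount' Rc, if_neg hRne, if_neg hRL, if_pos rfl]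
              omega
          · by_cases hwL : w = Lc
            · have hLRne : ¬ Lc = Rc := by rw [← hwL]; exact hwR
              simp only [hwL]
              rw [e2 Lc, if_neg hLRne, e1 Lc, if_pos rfl, e0 Lc, if_neg hLne,
                hcount' Lc, if_neg hLne, if_pos rfl, if_neg hLRne]
              omega
            · rw [e2 w, if_neg hwR, e1 w, if_neg hwL, e0 w, if_neg hws,
                hcount' w, if_neg hws, if_neg hwL, if_neg hwR]
              omega
      have hRep' : RepB cnt2 M' := by
        refine ⟨?_, hgetD2, fun x hx => (hbatch.1 x hx).1, ?_, ?_⟩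
        · exact PySem.Dict.nodup_keys_insert _ _ _
            (PySem.Dict.nodup_keys_insert _ _ _ (pv_nodup_keys_erase _ _ hnd))
        · intro x hx
          rw [← List.count_pos_iff]
          have hgd := hgetD2 x
          rcases (PySem.Dict.mem_keys_insert _ _ _ _).1 hx with rfl | hx1
          · omega
          rcases (PySem.Dict.mem_keys_insert _ _ _ _).1 hx1 with rfl | hx2
          · omega
          · obtain ⟨hxk, hxs⟩ := (pv_mem_keys_erase _ _ _).1 hx2
            have : 0 < M.count x := List.count_pos_iff.2 (hkeysM x hxk)
            have := hcount' x
            split_ifs at this <;> omega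
        · have : Lc ∈ M' := by rw [← List.count_pos_iff]; omega
          exact List.ne_nil_of_mem this
      have hih := ih cnt2 M' (k - v) hRep' (by omega) (by push_cast at h2 ⊢; omega)
      rw [hih]
      have harith : (k - v - 1).toNat + cN = (k - 1).toNat := by omega
      rw [hM', ← Function.iterate_add_apply, harith]

lemma pv_B_char (N K : Int) (hN : 0 ≤ N) (hK : 1 ≤ K) :
    fill_stalls_alt N K = pvPair (pvT^[K.toNat - 1] [N]) := by
  unfold fill_stalls_alt
  have hRep : RepB (PySem.Dict.empty.insert N 1) [N] := by
    refine ⟨?_, ?_, ?_, ?_, ?_⟩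
    · show ([(N, 1)].map Prod.fst).Nodup
      simp
    · intro v
      rw [PySem.Dict.getD_insert]
      by_cases h : v = N
      · simp [h]
      · simp [h, Ne.symm h]
    · intro x hx
      simp only [List.mem_singleton] at hx
      omega
    · intro k hk
      show k ∈ [N]
      have : k ∈ ([(N, 1)].map Prod.fst : List Int) := hk
      simpa using this
    · simp
  have := pv_bLoop_correct (K.toNat + 1) _ [N] K hRep hK (by push_cast; omega)
  rw [this]
  congr 1
  congr 1
  omega

-- ===== VERDICT (by name: the statement is the Claim_ definition above) =====
theorem fill_stalls_spec : Claim_equal_fill_stalls := by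
  intro N K _hdom hpre
  unfold Spec_fill_stalls
  rw [pv_A_char N K hpre.2 hpre.1, pv_B_char N K hpre.2 hpre.1]
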